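-- pv_equiv track=rewrite | github.com/khajornritdacha/com-prog | GraderProbs/07_StrFile/PasswordStrength.py | letter_sequence
-- ===== SOURCE A (Python) =====
-- import string
--
-- def letter_sequence(t, pat = string.ascii_lowercase):
--     t = t.lower()
--     for idx in range(0, len(t)-3):
--         cur = t[idx: idx+4]
--         if cur in pat:
--             return True
--         if cur[::-1] in pat:
--             return True
--
--     return False
-- ===== SOURCE B (Python) =====
-- import string
--
-- def letter_sequence(t, pat=string.ascii_lowercase):
--     # Dual scan: iterate over pat's 4-grams and search each in t; descending
--     # windows of t are covered by searching in t reversed (reversed once),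
--     # instead of iterating t's windows and probing pat per window.
--     tl = t.lower()
--     rl = tl[::-1]
--     return any(pat[i:i+4] in tl or pat[i:i+4] in rl
--                for i in range(0, len(pat) - 3))
-- ===== Notes on version B (the rewrite author's own statement) =====
-- stated objective: alternative
-- what changed: B swaps the traversal: it iterates over pat's 4-grams and searches each in t (and in t reversed, computed once, instead of reversing every window), whereas A iterates over t's 4-char windows and probes pat per window.
import Mathlib
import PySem

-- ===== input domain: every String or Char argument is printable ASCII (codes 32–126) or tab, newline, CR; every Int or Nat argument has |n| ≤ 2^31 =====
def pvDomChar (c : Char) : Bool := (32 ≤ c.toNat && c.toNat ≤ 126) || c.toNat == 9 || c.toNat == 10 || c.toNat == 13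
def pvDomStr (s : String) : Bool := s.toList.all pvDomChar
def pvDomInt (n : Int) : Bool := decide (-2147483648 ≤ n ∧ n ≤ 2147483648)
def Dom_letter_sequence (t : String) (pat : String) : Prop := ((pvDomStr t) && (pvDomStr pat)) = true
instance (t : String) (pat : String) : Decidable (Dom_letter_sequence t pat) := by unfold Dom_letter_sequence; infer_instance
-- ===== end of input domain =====

-- B swaps the traversal: it searches each 4-gram of pat in t and in t reversed (reversed once),
-- instead of scanning t's windows and probing pat per window (alternative algorithm; not measured faster).

-- ===== PORT A =====
-- the 'for idx in range(0, len(t)-3)' loop with its two early returns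
def pvALoop (tl pl : List Char) : List Int → Bool
  | [] => false
  | idx :: rest =>
    let cur := PySem.List.slice tl (some idx) (some (idx + 4))
    if PySem.Chars.isIn cur pl then true
    else if PySem.Chars.isIn ((PySem.List.slice? cur none none (-1)).getD []) pl then true
    else pvALoop tl pl rest

def letter_sequence (t : String) (pat : String) : Bool :=
  let tl := PySem.Chars.lower t.toList
  pvALoop tl pat.toList (PySem.List.pyRange 0 ((tl.length : Int) - 3) 1)

-- ===== PORT B =====
-- 'any(pat[i:i+4] in tl or pat[i:i+4] in rl for i in range(0, len(pat) - 3))'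
def letter_sequence_alt (t : String) (pat : String) : Bool :=
  let tl := PySem.Chars.lower t.toList
  let rl := (PySem.List.slice? tl none none (-1)).getD []
  (PySem.List.pyRange 0 ((pat.toList.length : Int) - 3) 1).any (fun i =>
    PySem.Chars.isIn (PySem.List.slice pat.toList (some i) (some (i + 4))) tl ||
    PySem.Chars.isIn (PySem.List.slice pat.toList (some i) (some (i + 4))) rl)

-- ===== PRECONDITION & SPEC =====
def Spec_letter_sequence (t : String) (pat : String) (out : Bool) : Prop := out = letter_sequence_alt t pat
instance (t : String) (pat : String) (out : Bool) : Decidable (Spec_letter_sequence t pat out) := by unfold Spec_letter_sequence; infer_instance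

-- ===== CLAIM (what is proved, stated in full; the proofs are below) =====
def Claim_equal_letter_sequence : Prop := ∀ (t : String) (pat : String), Dom_letter_sequence t pat → Spec_letter_sequence t pat (letter_sequence t pat)

-- ===== LEMMAS AND PROOFS =====

-- A's loop is an 'any' over the window indices
theorem pvALoop_eq_any (tl pl : List Char) (idxs : List Int) :
    pvALoop tl pl idxs =
      idxs.any (fun idx =>
        PySem.Chars.isIn (PySem.List.slice tl (some idx) (some (idx + 4))) pl ||
        PySem.Chars.isIn (PySem.List.slice tl (some idx) (some (idx + 4))).reverse pl) := by
  induction idxs with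
  | nil => rfl
  | cons i rest ih =>
    simp only [pvALoop, PySem.List.slice?_none_none_neg_one, Option.getD_some, ih, List.any_cons]
    by_cases h1 : PySem.Chars.isIn (PySem.List.slice tl (some i) (some (i + 4))) pl <;>
      by_cases h2 : PySem.Chars.isIn (PySem.List.slice tl (some i) (some (i + 4))).reverse pl <;>
      simp [h1, h2]

-- a slice of natural length 4 at an in-range index
theorem slice_four (xs : List Char) (n : Nat) :
    PySem.List.slice xs (some (n : Int)) (some ((n : Int) + 4)) = (xs.drop n).take 4 := by
  have h4 : ((n : Int) + 4) = ((n + 4 : Nat) : Int) := by push_cast; ring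
  rw [h4, PySem.List.slice_natCast]
  congr 1
  omega

-- 'w in pl' for a 4-char w is membership among pl's 4-grams
theorem isIn_iff_gram (pl w : List Char) (hw : w.length = 4) :
    PySem.Chars.isIn w pl = true ↔
      ∃ i ∈ PySem.List.pyRange 0 ((pl.length : Int) - 3) 1,
        PySem.List.slice pl (some i) (some (i + 4)) = w := by
  rw [← PySem.Chars.exists_prefix_drop_iff_isIn]
  constructor
  · rintro ⟨j, hj⟩
    have hlen : w.length ≤ (pl.drop j).length := hj.length_le
    have hb : j + 4 ≤ pl.length := by simp at hlen; omega
    refine ⟨(j : Int), ?_, ?_⟩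
    · rw [PySem.List.mem_pyRange_one]
      constructor
      · exact Int.natCast_nonneg j
      · omega
    · rw [slice_four]
      have := List.prefix_iff_eq_take.mp hj
      rw [← hw, ← this]
  · rintro ⟨i, hi, hg⟩
    rw [PySem.List.mem_pyRange_one] at hi
    obtain ⟨h0, _⟩ := hi
    lift i to Nat using h0 with n
    refine ⟨n, ?_⟩
    rw [slice_four] at hg
    rw [← hg]
    exact List.take_prefix _ _

-- a window of tl taken at an in-range index has length 4
theorem window_len (tl : List Char) (j : Int)
    (hj : j ∈ PySem.List.pyRange 0 ((tl.length : Int) - 3) 1) :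
    ∃ n : Nat, j = (n : Int) ∧ (PySem.List.slice tl (some j) (some (j + 4))).length = 4 := by
  rw [PySem.List.mem_pyRange_one] at hj
  obtain ⟨h0, hlt⟩ := hj
  lift j to Nat using h0 with n
  refine ⟨n, rfl, ?_⟩
  rw [slice_four]
  simp
  omega

-- 'g in tl.reverse' is 'g.reverse in tl'
theorem isIn_reverse (g tl : List Char) :
    PySem.Chars.isIn g tl.reverse = PySem.Chars.isIn g.reverse tl := by
  rcases Bool.eq_false_or_eq_true (PySem.Chars.isIn g.reverse tl) with h | h <;> rw [h]
  · rw [PySem.Chars.isIn_iff_infix] at h ⊢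
    simpa using List.reverse_infix.mpr h
  · rw [PySem.Chars.isIn_eq_false_iff] at h ⊢
    intro hinf
    exact h (by simpa using List.reverse_infix.mpr hinf)

-- the symmetric characterization both programs compute
def pvHit (tl pl : List Char) : Prop :=
  ∃ j ∈ PySem.List.pyRange 0 ((tl.length : Int) - 3) 1,
    ∃ i ∈ PySem.List.pyRange 0 ((pl.length : Int) - 3) 1,
      PySem.List.slice pl (some i) (some (i + 4)) = PySem.List.slice tl (some j) (some (j + 4)) ∨
      PySem.List.slice pl (some i) (some (i + 4)) = (PySem.List.slice tl (some j) (some (j + 4))).reverse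

theorem a_iff_hit (tl pl : List Char) :
    ((PySem.List.pyRange 0 ((tl.length : Int) - 3) 1).any (fun idx =>
        PySem.Chars.isIn (PySem.List.slice tl (some idx) (some (idx + 4))) pl ||
        PySem.Chars.isIn (PySem.List.slice tl (some idx) (some (idx + 4))).reverse pl)) = true ↔
      pvHit tl pl := by
  rw [List.any_eq_true]
  unfold pvHit
  constructor
  · rintro ⟨j, hj, hb⟩
    obtain ⟨n, rfl, hlen⟩ := window_len tl j hj
    rw [Bool.or_eq_true] at hb
    rcases hb with hb | hb
    · obtain ⟨i, hi, hg⟩ := (isIn_iff_gram pl _ hlen).mp hb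
      exact ⟨_, hj, i, hi, Or.inl hg⟩
    · obtain ⟨i, hi, hg⟩ := (isIn_iff_gram pl _ (by simp [hlen])).mp hb
      exact ⟨_, hj, i, hi, Or.inr hg⟩
  · rintro ⟨j, hj, i, hi, hg⟩
    obtain ⟨n, rfl, hlen⟩ := window_len tl j hj
    refine ⟨_, hj, ?_⟩
    rw [Bool.or_eq_true]
    rcases hg with hg | hg
    · exact Or.inl ((isIn_iff_gram pl _ hlen).mpr ⟨i, hi, hg⟩)
    · exact Or.inr ((isIn_iff_gram pl _ (by simp [hlen])).mpr ⟨i, hi, hg⟩)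

theorem b_iff_hit (tl pl : List Char) :
    ((PySem.List.pyRange 0 ((pl.length : Int) - 3) 1).any (fun i =>
        PySem.Chars.isIn (PySem.List.slice pl (some i) (some (i + 4))) tl ||
        PySem.Chars.isIn (PySem.List.slice pl (some i) (some (i + 4))) tl.reverse)) = true ↔
      pvHit tl pl := by
  rw [List.any_eq_true]
  unfold pvHit
  constructor
  · rintro ⟨i, hi, hb⟩
    obtain ⟨m, rfl, hlen⟩ := window_len pl i hi
    rw [Bool.or_eq_true] at hb
    rcases hb with hb | hb
    · obtain ⟨j, hj, hg⟩ := (isIn_iff_gram tl _ hlen).mp hb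
      exact ⟨j, hj, _, hi, Or.inl hg.symm⟩
    · rw [isIn_reverse] at hb
      obtain ⟨j, hj, hg⟩ := (isIn_iff_gram tl _ (by simp [hlen])).mp hb
      refine ⟨j, hj, _, hi, Or.inr ?_⟩
      rw [hg, List.reverse_reverse]
  · rintro ⟨j, hj, i, hi, hg⟩
    obtain ⟨m, rfl, hlen⟩ := window_len pl i hi
    refine ⟨_, hi, ?_⟩
    rw [Bool.or_eq_true]
    rcases hg with hg | hg
    · exact Or.inl ((isIn_iff_gram tl _ hlen).mpr ⟨j, hj, hg.symm⟩)
    · refine Or.inr ?_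
      rw [isIn_reverse]
      refine (isIn_iff_gram tl _ (by simp [hlen])).mpr ⟨j, hj, ?_⟩
      rw [hg]; simp

-- ===== VERDICT (by name: the statement is the Claim_ definition above) =====
theorem letter_sequence_spec : Claim_equal_letter_sequence := by
  intro t pat _
  unfold Spec_letter_sequence letter_sequence letter_sequence_alt
  simp only [PySem.List.slice?_none_none_neg_one, Option.getD_some]
  rw [pvALoop_eq_any]
  rw [Bool.eq_iff_iff, a_iff_hit, b_iff_hit]
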